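-- pv_equiv track=rewrite | github.com/fmwalle/Data_Stracture_excersise | Linkedlistandrecurssion/coddingFandamental101/recurssion/recursion.py | count_sum_eight
-- ===== SOURCE A (Python) =====
-- def count_sum_eight(nums):
--     sum=0
--     count=0
--     while nums>0:
--         if nums%10==8:
--             count+=1
--             sum+=count
--         elif nums%10!=8:
--             count-=1
--             sum+=count
--         nums=nums//10
--     return sum
-- ===== SOURCE B (Python) =====
-- def count_sum_eight(nums):
--     def helper(nums, count):
--         if nums <= 0:
--             return 0
--         count = count + 1 if nums % 10 == 8 else count - 1
--         return count + helper(nums // 10, count)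
--     return helper(nums, 0)
-- ===== Notes on version B (the rewrite author's own statement) =====
-- stated objective: alternative
-- what changed: Replaces A's while-loop with two mutable accumulators (sum, count) by an LSB-first recursion threading only the running count and summing on the way out.
import Mathlib
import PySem

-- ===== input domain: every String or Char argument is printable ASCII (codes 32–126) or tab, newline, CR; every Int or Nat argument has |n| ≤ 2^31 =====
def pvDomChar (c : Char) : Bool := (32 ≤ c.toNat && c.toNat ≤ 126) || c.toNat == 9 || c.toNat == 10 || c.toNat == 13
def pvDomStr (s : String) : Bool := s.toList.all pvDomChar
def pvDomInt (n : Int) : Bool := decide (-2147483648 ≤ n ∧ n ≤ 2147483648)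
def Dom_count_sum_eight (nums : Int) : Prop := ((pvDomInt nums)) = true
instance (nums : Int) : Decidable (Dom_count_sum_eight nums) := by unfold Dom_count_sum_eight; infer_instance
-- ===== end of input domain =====

-- B replaces A's while-loop with two accumulators by an LSB-first recursion threading only the running count (alternative decomposition; same cost).

-- termination measure helper (cited by both ports' decreasing_by)
theorem pvFloordiv10_lt (n : Int) (h : 0 < n) :
    (PySem.Int.floordiv n 10).toNat < n.toNat := by
  rw [PySem.Int.floordiv_eq_ediv_of_pos (by omega)]
  omega

-- ===== PORT A =====
-- while nums>0: update count by the last digit, add count to sum, nums //= 10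
def count_sum_eight_loop (nums sum count : Int) : Int :=
  if h : nums > 0 then
    if PySem.Int.mod nums 10 = 8 then
      count_sum_eight_loop (PySem.Int.floordiv nums 10) (sum + (count + 1)) (count + 1)
    else
      count_sum_eight_loop (PySem.Int.floordiv nums 10) (sum + (count - 1)) (count - 1)
  else sum
termination_by nums.toNat
decreasing_by all_goals exact pvFloordiv10_lt nums h

def count_sum_eight (nums : Int) : Int := count_sum_eight_loop nums 0 0

-- ===== PORT B =====
def count_sum_eight_helper (nums count : Int) : Int :=
  if _h : nums ≤ 0 then 0
  else
    let count' := if PySem.Int.mod nums 10 = 8 then count + 1 else count - 1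
    count' + count_sum_eight_helper (PySem.Int.floordiv nums 10) count'
termination_by nums.toNat
decreasing_by exact pvFloordiv10_lt nums (by omega)

def count_sum_eight_alt (nums : Int) : Int := count_sum_eight_helper nums 0

-- ===== PRECONDITION & SPEC =====
def Spec_count_sum_eight (nums : Int) (out : Int) : Prop := out = count_sum_eight_alt nums
instance (nums : Int) (out : Int) : Decidable (Spec_count_sum_eight nums out) := by unfold Spec_count_sum_eight; infer_instance

-- ===== CLAIM (what is proved, stated in full; the proofs are below) =====
def Claim_equal_count_sum_eight : Prop := ∀ (nums : Int), Dom_count_sum_eight nums → Spec_count_sum_eight nums (count_sum_eight nums)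

-- ===== LEMMAS AND PROOFS =====
theorem loop_eq_sum_add_helper (fuel : Nat) (nums sum count : Int) (hf : nums.toNat ≤ fuel) :
    count_sum_eight_loop nums sum count = sum + count_sum_eight_helper nums count := by
  induction fuel generalizing nums sum count with
  | zero =>
    rw [count_sum_eight_loop, count_sum_eight_helper]
    have : ¬ nums > 0 := by omega
    simp [this, show nums ≤ 0 by omega]
  | succ k ih =>
    rw [count_sum_eight_loop, count_sum_eight_helper]
    by_cases h : nums > 0
    · have hk : (PySem.Int.floordiv nums 10).toNat ≤ k := by
        have := pvFloordiv10_lt nums h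
        omega
      simp only [h, dif_pos, dif_neg (show ¬ nums ≤ 0 by omega)]
      by_cases h8 : PySem.Int.mod nums 10 = 8 <;>
        simp only [h8, if_true, if_false] <;>
        rw [ih _ _ _ hk] <;> ring
    · simp [h, show nums ≤ 0 by omega]

-- ===== VERDICT (by name: the statement is the Claim_ definition above) =====
theorem count_sum_eight_spec : Claim_equal_count_sum_eight := by
  intro nums _
  unfold Spec_count_sum_eight count_sum_eight count_sum_eight_alt
  rw [loop_eq_sum_add_helper nums.toNat nums 0 0 le_rfl]
  ring
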